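-- pv_equiv track=rewrite | github.com/Jyoungjo/Algorithm_python | 백준/Gold/1461. 도서관/도서관.py | cal_each_steps
-- ===== SOURCE A (Python) =====
-- from heapq import heappush, heappop
--
-- def cal_each_steps(M, h):
--     total_cnt, tmp = 0, 0
--     while h:
--         dist = heappop(h)
--         if not tmp:
--             tmp = dist
--
--         for i in range(M-1):
--             if not h:
--                 break
--             heappop(h)
--
--         total_cnt += dist * 2
--     return -total_cnt, -tmp
-- ===== SOURCE B (Python) =====
-- from heapq import heappop
--
--
-- def cal_each_steps(M, h):
--     # Drain the heap completely (h is emptied in place, like the original),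
--     # then work on the popped sequence with a strided slice.
--     lst = []
--     while h:
--         lst.append(heappop(h))
--     step = M if M > 1 else 1
--     leaders = lst[::step]
--     total = sum(leaders) * 2
--     tmp = next((v for v in leaders if v), 0)
--     return -total, -tmp
-- ===== Notes on version B (the rewrite author's own statement) =====
-- stated objective: simpler
-- what changed: A interleaves heap pops with accumulation (an outer while carrying total/tmp plus an inner discard loop of M-1 pops); B first drains the heap into a list, then computes the answer in one strided pass: leaders = lst[::max(M,1)], total = sum(leaders)*2 and tmp = the first nonzero leader.
import Mathlib
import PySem

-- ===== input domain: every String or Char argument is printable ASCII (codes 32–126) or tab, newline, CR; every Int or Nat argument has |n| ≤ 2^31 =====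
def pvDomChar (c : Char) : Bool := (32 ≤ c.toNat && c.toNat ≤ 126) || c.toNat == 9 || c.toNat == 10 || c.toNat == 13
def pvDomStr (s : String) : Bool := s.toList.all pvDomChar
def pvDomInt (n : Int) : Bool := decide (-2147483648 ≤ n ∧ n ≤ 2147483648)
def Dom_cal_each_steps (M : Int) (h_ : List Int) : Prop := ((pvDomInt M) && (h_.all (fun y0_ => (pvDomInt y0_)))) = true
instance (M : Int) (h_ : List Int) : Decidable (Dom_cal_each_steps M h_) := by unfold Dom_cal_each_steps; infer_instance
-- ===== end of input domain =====

-- B drains the heap first and then takes one strided pass over the popped sequence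
-- (objective: simpler decomposition, same cost); both A and B empty the list argument
-- `h` in place in Python — the equivalence proved here is about the RETURN value.
-- Each port carries its own model of the heapq.heappop library call: A's is the fuel/loop
-- transliteration of CPython's _siftup/_siftdown, B's a well-founded-recursion rendering;
-- they are proved equal below (pvPopMin_eq_heappop).

-- ===== PORT A =====
-- library helper for A: CPython heapq._siftdown, step for step (fuel = pos+1 is
-- always enough iterations, since pos strictly decreases each turn)
def pvSiftdownLoop : Nat → Array Int → Nat → Nat → Int → Array Int
  | 0, a, _, pos, newitem => a.setIfInBounds pos newitem
  | fuel+1, a, startpos, pos, newitem =>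
    if startpos < pos then
      let parentpos := (pos - 1) / 2
      let parent := a.getD parentpos 0
      if newitem < parent then
        pvSiftdownLoop fuel (a.setIfInBounds pos parent) startpos parentpos newitem
      else a.setIfInBounds pos newitem
    else a.setIfInBounds pos newitem

-- library helper for A: CPython heapq._siftup, step for step (fuel = size+1 is always
-- enough, since pos strictly increases and stays below the size)
def pvSiftupLoop : Nat → Array Int → Nat → Nat → Int → Array Int
  | 0, a, startpos, pos, newitem => pvSiftdownLoop (pos+1) (a.setIfInBounds pos newitem) startpos pos newitem
  | fuel+1, a, startpos, pos, newitem =>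
    let endpos := a.size
    let childpos := 2*pos+1
    if childpos < endpos then
      let rightpos := childpos + 1
      let childpos := if rightpos < endpos && !(a.getD childpos 0 < a.getD rightpos 0) then rightpos else childpos
      pvSiftupLoop fuel (a.setIfInBounds pos (a.getD childpos 0)) startpos childpos newitem
    else pvSiftdownLoop (pos+1) (a.setIfInBounds pos newitem) startpos pos newitem

-- A's model of heapq.heappop: returns (popped value, remaining list); only ever called on a
-- nonempty list by A (Python raises IndexError on an empty one)
def pvHeappop (h : List Int) : Int × List Int :=
  match h.getLast? with
  | none => (0, [])
  | some lastelt =>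
    let rest := h.dropLast
    if rest.isEmpty then (lastelt, [])
    else
      let a := rest.toArray.setIfInBounds 0 lastelt
      (rest.headD 0, (pvSiftupLoop (a.size+1) a 0 0 lastelt).toList)

theorem pvHeappop_length (h : List Int) (hne : h ≠ []) :
    (pvHeappop h).2.length = h.length - 1 := by
  have size_down : ∀ f a s p x, (pvSiftdownLoop f a s p x).size = a.size := by
    intro f
    induction f with
    | zero => intro a s p x; simp [pvSiftdownLoop]
    | succ n ih => intro a s p x; simp only [pvSiftdownLoop]; split_ifs <;> simp [ih]
  have size_up : ∀ f a s p x, (pvSiftupLoop f a s p x).size = a.size := by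
    intro f
    induction f with
    | zero => intro a s p x; simp [pvSiftupLoop, size_down]
    | succ n ih => intro a s p x; simp only [pvSiftupLoop]; split_ifs <;> simp [ih, size_down]
  unfold pvHeappop
  match hl : h.getLast? with
  | none => exact absurd (List.getLast?_eq_none_iff.mp hl) hne
  | some lastelt =>
    simp only []
    split_ifs with hr
    · have h0 : h.dropLast.length = h.length - 1 := (List.length_dropLast (xs := h))
      have h1 : h.dropLast.length = 0 := by simp [List.isEmpty_iff.mp hr]
      simp only [List.length_nil]
      omega
    · simp [size_up, List.length_dropLast]

-- 'for i in range(M-1): if not h: break; heappop(h)' — pops min(M-1, len) times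
def pvPopK : Nat → List Int → List Int
  | 0, h => h
  | k+1, h => if h.isEmpty then h else pvPopK k (pvHeappop h).2

theorem pvPopK_length_le (k : Nat) : ∀ h : List Int, (pvPopK k h).length ≤ h.length := by
  induction k with
  | zero => intro h; simp [pvPopK]
  | succ n ih =>
    intro h
    simp only [pvPopK]
    split_ifs with he
    · exact le_rfl
    · have hne : h ≠ [] := by simpa [List.isEmpty_iff] using he
      have := pvHeappop_length h hne
      have := ih (pvHeappop h).2
      omega

-- the 'while h:' loop of A, carrying (total_cnt, tmp)
def pvCalLoop (M : Int) (h : List Int) (total tmp : Int) : Int × Int :=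
  if he : h.isEmpty then (-total, -tmp)
  else
    let p := pvHeappop h
    let tmp' := if tmp = 0 then p.1 else tmp
    let h2 := pvPopK (M-1).toNat p.2
    pvCalLoop M h2 (total + p.1 * 2) tmp'
termination_by h.length
decreasing_by
  have hne : h ≠ [] := by simpa [List.isEmpty_iff] using he
  have h1 := pvHeappop_length h hne
  have h2 := pvPopK_length_le (M-1).toNat (pvHeappop h).2
  have : h.length ≠ 0 := by simpa using List.length_eq_zero_iff.not.mpr hne
  omega

def cal_each_steps (M : Int) (h_ : List Int) : Int × Int :=
  pvCalLoop M h_ 0 0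

-- ===== PORT B =====
-- library helper for B: CPython heapq._siftdown, rendered as one combined-condition
-- loop (move the parent down while the position is above the root and the new item is
-- smaller); the bound is the iteration count, k+1 is always enough
def pvUpB (arr : Array Int) (root k : Nat) (x : Int) : Nat → Array Int
  | 0 => arr.setIfInBounds k x
  | f+1 =>
    if root < k ∧ x < arr.getD ((k-1)/2) 0 then
      pvUpB (arr.setIfInBounds k (arr.getD ((k-1)/2) 0)) root ((k-1)/2) x f
    else arr.setIfInBounds k x

-- library helper for B: CPython heapq._siftup, likewise bounded by the iteration count
-- (arr.size+1 is always enough); the smaller-child choice is spelled as a conjunction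
def pvDownB (arr : Array Int) (root k : Nat) (x : Int) : Nat → Array Int
  | 0 => pvUpB (arr.setIfInBounds k x) root k x (k+1)
  | f+1 =>
    if 2*k+1 < arr.size then
      if 2*k+2 < arr.size ∧ ¬ (arr.getD (2*k+1) 0 < arr.getD (2*k+2) 0) then
        pvDownB (arr.setIfInBounds k (arr.getD (2*k+2) 0)) root (2*k+2) x f
      else
        pvDownB (arr.setIfInBounds k (arr.getD (2*k+1) 0)) root (2*k+1) x f
    else pvUpB (arr.setIfInBounds k x) root k x (k+1)

-- B's model of heapq.heappop, by list decomposition: pop the tail element, put it at the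
-- root, sift; only ever called on a nonempty list by B
def pvPopMin (h : List Int) : Int × List Int :=
  let lastelt := h.getLastD 0
  match h.dropLast with
  | [] => (lastelt, [])
  | top :: more =>
      let arr0 := #[lastelt] ++ more.toArray
      (top, (pvDownB arr0 0 0 lastelt (arr0.size + 1)).toList)

theorem pvUpB_size (root : Nat) (x : Int) : ∀ f k (arr : Array Int), (pvUpB arr root k x f).size = arr.size := by
  intro f
  induction f with
  | zero => intro k arr; simp [pvUpB]
  | succ n ih =>
    intro k arr
    simp only [pvUpB]
    split_ifs with hk
    · rw [ih]; simp
    · simp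

theorem pvDownB_size (root : Nat) (x : Int) : ∀ f k (arr : Array Int), (pvDownB arr root k x f).size = arr.size := by
  intro f
  induction f with
  | zero => intro k arr; simp [pvDownB, pvUpB_size]
  | succ n ih =>
    intro k arr
    simp only [pvDownB]
    split_ifs with hc hb
    · rw [ih]; simp
    · rw [ih]; simp
    · simp [pvUpB_size]

theorem pvPopMin_length (h : List Int) : (pvPopMin h).2.length = h.length - 1 := by
  unfold pvPopMin
  match hd : h.dropLast with
  | [] =>
    have h0 : h.dropLast.length = 0 := by simp [hd]
    have h1 := List.length_dropLast (xs := h)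
    simp only [List.length_nil]
    omega
  | top :: more =>
    have hlen : h.dropLast.length = h.length - 1 := List.length_dropLast (xs := h)
    simp only [hd] at hlen
    simp only [Array.length_toList, pvDownB_size]
    simp at hlen ⊢
    omega

-- 'lst = []; while h: lst.append(heappop(h))'
def pvDrain (h : List Int) : List Int :=
  if hne : h = [] then [] else (pvPopMin h).1 :: pvDrain (pvPopMin h).2
termination_by h.length
decreasing_by
  have h1 := pvPopMin_length h
  have h2 : h.length ≠ 0 := by simpa using List.length_eq_zero_iff.not.mpr hne
  omega

-- lst[::step]: exact for step ≥ 1 (the only way B computes it, since step = max(M,1))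
def pvStrided (step : Nat) : List Int → List Int
  | [] => []
  | lead :: tail => lead :: pvStrided step (tail.drop (step-1))
termination_by l => l.length
decreasing_by simp [List.length_drop]

def cal_each_steps_alt (M : Int) (h_ : List Int) : Int × Int :=
  let lst := pvDrain h_
  let step : Nat := if M > 1 then M.toNat else 1
  let leaders := pvStrided step lst
  let total := leaders.sum * 2
  let tmp := (leaders.find? (· != 0)).getD 0
  (-total, -tmp)

-- ===== PRECONDITION & SPEC =====
def Spec_cal_each_steps (M : Int) (h_ : List Int) (out : Int × Int) : Prop := out = cal_each_steps_alt M h_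
instance (M : Int) (h_ : List Int) (out : Int × Int) : Decidable (Spec_cal_each_steps M h_ out) := by unfold Spec_cal_each_steps; infer_instance

-- ===== CLAIM (what is proved, stated in full; the proofs are below) =====
def Claim_equal_cal_each_steps : Prop := ∀ (M : Int) (h_ : List Int), Dom_cal_each_steps M h_ → Spec_cal_each_steps M h_ (cal_each_steps M h_)

-- ===== LEMMAS AND PROOFS =====

-- the two renderings of _siftdown agree at every fuel
theorem pvUpB_eq_siftdown (f : Nat) : ∀ (a : Array Int) (s p : Nat) (x : Int),
    pvSiftdownLoop f a s p x = pvUpB a s p x f := by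
  induction f with
  | zero => intro a s p x; simp [pvSiftdownLoop, pvUpB]
  | succ n ih =>
    intro a s p x
    simp only [pvSiftdownLoop, pvUpB]
    by_cases hs : s < p
    · by_cases hl : x < a.getD ((p-1)/2) 0
      · rw [if_pos hs, if_pos hl, if_pos ⟨hs, hl⟩, ih]
      · rw [if_pos hs, if_neg hl, if_neg (by intro hand; exact hl hand.2)]
    · rw [if_neg hs, if_neg (by intro hand; exact hs hand.1)]

-- the two renderings of _siftup agree at every fuel
theorem pvDownB_eq_siftup (f : Nat) : ∀ (a : Array Int) (s p : Nat) (x : Int),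
    pvSiftupLoop f a s p x = pvDownB a s p x f := by
  induction f with
  | zero => intro a s p x; simp only [pvSiftupLoop, pvDownB]; exact pvUpB_eq_siftdown (p+1) _ s p x
  | succ n ih =>
    intro a s p x
    simp only [pvSiftupLoop, pvDownB]
    have h22 : 2*p+1+1 = 2*p+2 := by omega
    rw [h22]
    simp only [Bool.and_eq_true, decide_eq_true_eq, Bool.not_eq_true', decide_eq_false_iff_not]
    split_ifs with hc hb
    · exact ih _ _ _ _
    · exact ih _ _ _ _
    · exact pvUpB_eq_siftdown (p+1) _ s p x

-- the two models of heappop agree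
theorem pvPopMin_eq_heappop (h : List Int) : pvPopMin h = pvHeappop h := by
  unfold pvPopMin pvHeappop
  match hl : h.getLast? with
  | none =>
    have : h = [] := List.getLast?_eq_none_iff.mp hl
    subst this
    simp
  | some lastelt =>
    have hgd : h.getLastD 0 = lastelt := by
      rw [List.getLastD_eq_getLast?, hl]
      rfl
    simp only [hgd]
    match hd : h.dropLast with
    | [] => simp
    | top :: more =>
      simp only [List.isEmpty_cons, Bool.false_eq_true, if_false]
      have harr : (top :: more).toArray.setIfInBounds 0 lastelt = #[lastelt] ++ more.toArray := by
        apply Array.toList_inj.mp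
        simp
      rw [harr]
      rw [pvDownB_eq_siftup ((#[lastelt] ++ more.toArray).size + 1) _ 0 0 lastelt]
      simp

-- draining after k discard-pops is dropping k elements of the drained sequence
theorem pvDrain_popK (k : Nat) : ∀ h : List Int, pvDrain (pvPopK k h) = (pvDrain h).drop k := by
  induction k with
  | zero => intro h; simp [pvPopK]
  | succ n ih =>
    intro h
    simp only [pvPopK]
    split_ifs with he
    · rw [pvDrain]; simp [List.isEmpty_iff.mp he]
    · rw [ih]
      conv_rhs => rw [pvDrain]
      have hne : ¬ (h = []) := by simpa [List.isEmpty_iff] using he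
      simp only [hne, dite_false, List.drop_succ_cons, pvPopMin_eq_heappop]

-- A's interleaved loop computes exactly B's staged answer
theorem pvCalLoop_eq (M : Int) (step : Nat) (hstep : step = (M-1).toNat + 1) :
    ∀ (n : Nat) (h : List Int) (total tmp : Int), h.length ≤ n →
      pvCalLoop M h total tmp =
        (-(total + (pvStrided step (pvDrain h)).sum * 2),
         -(if tmp = 0 then ((pvStrided step (pvDrain h)).find? (· != 0)).getD 0 else tmp)) := by
  intro n
  induction n with
  | zero =>
    intro h total tmp hlen
    have he : h = [] := List.length_eq_zero_iff.mp (Nat.le_zero.mp hlen)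
    subst he
    rw [pvCalLoop, pvDrain]
    simp [pvStrided]
  | succ n ih =>
    intro h total tmp hlen
    by_cases he : h.isEmpty
    · have he' : h = [] := List.isEmpty_iff.mp he
      subst he'
      rw [pvCalLoop, pvDrain]
      simp [pvStrided]
    · have hne : h ≠ [] := by simpa [List.isEmpty_iff] using he
      rw [pvCalLoop]
      simp only [he, Bool.false_eq_true, dite_false]
      have hlen2 : (pvPopK (M-1).toNat (pvHeappop h).2).length ≤ n := by
        have h1 := pvHeappop_length h hne
        have h2 := pvPopK_length_le (M-1).toNat (pvHeappop h).2
        have : h.length ≠ 0 := by simpa using List.length_eq_zero_iff.not.mpr hne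
        omega
      rw [ih _ _ _ hlen2, pvDrain_popK]
      conv_rhs => rw [pvDrain]
      simp only [hne, dite_false, pvPopMin_eq_heappop]
      have hstep1 : step - 1 = (M - 1).toNat := by omega
      have hstride : pvStrided step ((pvHeappop h).1 :: pvDrain (pvHeappop h).2)
          = (pvHeappop h).1 :: pvStrided step ((pvDrain (pvHeappop h).2).drop (M-1).toNat) := by
        rw [pvStrided, hstep1]
      rw [hstride]
      simp only [Prod.mk.injEq]
      constructor
      · simp only [List.sum_cons]; ring_nf
      · by_cases htmp : tmp = 0
        · subst htmp
          by_cases hd : (pvHeappop h).1 = 0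
          · rw [List.find?_cons_of_neg (by simp [hd])]
            simp [hd]
          · rw [List.find?_cons_of_pos (by simp [hd])]
            simp [hd]
        · simp [htmp]

theorem pvStep_eq (M : Int) : (if M > 1 then M.toNat else 1) = (M-1).toNat + 1 := by
  split_ifs with hm <;> omega

-- ===== VERDICT (by name: the statement is the Claim_ definition above) =====
theorem cal_each_steps_spec : Claim_equal_cal_each_steps := by
  intro M h_ _
  unfold Spec_cal_each_steps cal_each_steps cal_each_steps_alt
  rw [pvStep_eq]
  rw [pvCalLoop_eq M ((M-1).toNat + 1) rfl h_.length h_ 0 0 le_rfl]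
  simp
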